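-- pv_equiv track=rewrite | github.com/breeze1c/biotree | block_tree.py | get_component
-- ===== SOURCE A (Python) =====
-- import queue
--
-- def connected_graph(conflict_dict):
--
--     num = len(conflict_dict)
--     visit = [0 for u in range(num)]
--     component = [[]]
--     idx = 0
--     for i in range(num):
--         if visit[i] == 0:
--             if len(conflict_dict[i]) == 0:
--                 component[0].append(i)
--             else:
--                 idx += 1
--                 q = queue.Queue()
--                 q.put(i)
--                 visit[i] = 1
--                 component.append([i])
--                 while not q.empty():
--                     a = q.get()
--                     for j in conflict_dict[a]:
--                         if visit[j] == 0:
--                             q.put(j)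
--                             visit[j] = 1
--                             component[idx].append(j)
--
--     return  component
--
-- def get_component(cluster_in):
--
--     num = len(cluster_in)
--     conflict_dict = {i:[] for i in range(num)}
--
--     for i in range(num - 1):
--         for j in range(i + 1, num):
--             len1 = len(cluster_in[i].intersection(cluster_in[j]))
--             if len1 > 0 and len1 < len(cluster_in[i]) and len1 < len(cluster_in[j]):
--                 conflict_dict[i].append(j)
--                 conflict_dict[j].append(i)
--
--     component = connected_graph(conflict_dict)
--     return component
-- ===== SOURCE B (Python) =====
-- def get_component(cluster_in):
--     n = len(cluster_in)
--     owners = {}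
--     for i in range(n):
--         for x in cluster_in[i]:
--             if x in owners:
--                 owners[x].append(i)
--             else:
--                 owners[x] = [i]
--     adj = [[] for _ in range(n)]
--     for i in range(n):
--         cand = set()
--         for x in cluster_in[i]:
--             cand.update(owners[x])
--         for j in sorted(cand):
--             if j > i:
--                 c = len(cluster_in[i] & cluster_in[j])
--                 if c < len(cluster_in[i]) and c < len(cluster_in[j]):
--                     adj[i].append(j)
--                     adj[j].append(i)
--     seen = [False] * n
--     component = [[]]
--     for i in range(n):
--         if not seen[i]:
--             if not adj[i]:
--                 component[0].append(i)
--             else: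
--                 seen[i] = True
--                 order = [i]
--                 q = [i]
--                 while q:
--                     a = q.pop(0)
--                     for j in adj[a]:
--                         if not seen[j]:
--                             seen[j] = True
--                             order.append(j)
--                             q.append(j)
--                 component.append(order)
--     return component
-- ===== Notes on version B (the rewrite author's own statement) =====
-- stated objective: alternative
-- what changed: B replaces A's all-pairs loop with an inverted index from element to the set-indices containing it: each set's conflict candidates are the deduplicated, ascending union of its element buckets (sharing a bucket already gives a nonempty intersection), only candidates j > i are tested and each conflict edge is inserted into both adjacency rows, then the same BFS component pass runs on those rows.
import Mathlib
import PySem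

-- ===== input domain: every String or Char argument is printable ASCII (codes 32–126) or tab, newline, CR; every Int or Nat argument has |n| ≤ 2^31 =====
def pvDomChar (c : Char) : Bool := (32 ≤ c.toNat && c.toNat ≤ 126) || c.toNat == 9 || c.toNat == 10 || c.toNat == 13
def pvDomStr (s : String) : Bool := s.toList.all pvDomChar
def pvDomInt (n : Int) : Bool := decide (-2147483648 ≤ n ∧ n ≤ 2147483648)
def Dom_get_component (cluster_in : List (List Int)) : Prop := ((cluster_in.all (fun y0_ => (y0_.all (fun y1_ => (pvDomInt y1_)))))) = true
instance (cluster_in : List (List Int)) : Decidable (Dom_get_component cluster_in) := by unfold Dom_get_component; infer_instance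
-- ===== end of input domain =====

-- B builds an inverted index (element -> indices of the sets containing it); each set's
-- conflict candidates are the deduplicated, sorted union of its element buckets, only
-- candidates j > i are tested and each edge is inserted symmetrically, instead of A's
-- all-pairs intersection loop; the BFS component pass is kept (objective: alternative).

-- Shared primitives: the same Python expressions occur verbatim in both programs.
-- cluster_in[i] — always in range in both programs (pyGetD is exact there)
def pvAt (cl : List (List Int)) (i : Int) : List Int := PySem.List.pyGetD cl i []
-- len(a.intersection(b)) / len(a & b) on Python sets (the list holds the set's distinct elements)
def pvInterLen (a b : List Int) : Int := PySem.List.len (PySem.Set.inter (PySem.Set.ofList a) b)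
-- len(s) on a Python set
def pvSetLen (a : List Int) : Int := PySem.List.len (PySem.Set.ofList a)

-- ===== PORT A =====
-- conflict_dict = {i: [] for i in range(num)};  double loop appending j / i on the conflict test
def pvConflictDict (cl : List (List Int)) : PySem.Dict Int (List Int) :=
  let num : Int := PySem.List.len cl
  let d0 : PySem.Dict Int (List Int) :=
    (PySem.List.pyRange 0 num 1).foldl (fun d i => d.insert i []) PySem.Dict.empty
  (PySem.List.pyRange 0 (num - 1) 1).foldl (fun d i =>
    (PySem.List.pyRange (i + 1) num 1).foldl (fun d j =>
      let len1 := pvInterLen (pvAt cl i) (pvAt cl j)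
      if 0 < len1 ∧ len1 < pvSetLen (pvAt cl i) ∧ len1 < pvSetLen (pvAt cl j) then
        (d.modify i [] (fun l => l ++ [j])).modify j [] (fun l => l ++ [i])
      else d) d) d0

-- the 'while not q.empty()' loop of connected_graph (fuel-bounded; one dequeue per step,
-- fuel num+1 covers every run since each enqueue flips a visit flag)
def pvBfsA (d : PySem.Dict Int (List Int)) (idx : Int) :
    Nat → List Int → List Int → List (List Int) → List Int × List (List Int)
  | 0, _, visit, comp => (visit, comp)
  | _ + 1, [], visit, comp => (visit, comp)
  | fuel + 1, a :: q', visit, comp =>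
    let st := (d.getD a []).foldl
      (fun (st : List Int × List Int × List (List Int)) j =>
        if PySem.List.pyGetD st.2.1 j 0 = 0 then
          (st.1 ++ [j], PySem.List.pySetD st.2.1 j 1,
           PySem.List.pySetD st.2.2 idx (PySem.List.pyGetD st.2.2 idx [] ++ [j]))
        else st)
      (q', visit, comp)
    pvBfsA d idx fuel st.1 st.2.1 st.2.2

-- connected_graph(conflict_dict)
def pvConnectedGraph (d : PySem.Dict Int (List Int)) : List (List Int) :=
  let num : Int := (PySem.Dict.size d : Int)
  let visit0 : List Int := (PySem.List.pyRange 0 num 1).map (fun _ => 0)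
  let st := (PySem.List.pyRange 0 num 1).foldl
    (fun (st : List Int × List (List Int) × Int) i =>
      if PySem.List.pyGetD st.1 i 0 = 0 then
        if PySem.List.len (d.getD i []) = 0 then
          (st.1, PySem.List.pySetD st.2.1 0 (PySem.List.pyGetD st.2.1 0 [] ++ [i]), st.2.2)
        else
          let idx := st.2.2 + 1
          let r := pvBfsA d idx (num.toNat + 1) [i]
            (PySem.List.pySetD st.1 i 1) (st.2.1 ++ [[i]])
          (r.1, r.2, idx)
      else st)
    (visit0, ([[]] : List (List Int)), (0 : Int))
  st.2.1

def get_component (cluster_in : List (List Int)) : List (List Int) :=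
  pvConnectedGraph (pvConflictDict cluster_in)

-- ===== PORT B =====
-- 'if x in owners: owners[x].append(i) else: owners[x] = [i]'
def pvOwnStep (i : Int) (d : PySem.Dict Int (List Int)) (x : Int) : PySem.Dict Int (List Int) :=
  if d.contains x then d.modify x [] (fun l => l ++ [i]) else d.insert x [i]

-- inverted index build; 'for x in cluster_in[i]' iterates a Python set, whose hash order is
-- not modelled — here we iterate its distinct elements in first-occurrence order, which is
-- exact because owners' bucket lists are consumed only through the deduplicated-then-sorted
-- candidate set below, so the result does not depend on that order
def pvOwners (cl : List (List Int)) : PySem.Dict Int (List Int) :=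
  (PySem.List.pyRange 0 (PySem.List.len cl) 1).foldl
    (fun d i => (PySem.Set.ofList (pvAt cl i)).foldl (pvOwnStep i) d) PySem.Dict.empty

-- 'cand = set(); for x in cluster_in[i]: cand.update(owners[x])'
def pvCandSet (cl : List (List Int)) (ow : PySem.Dict Int (List Int)) (i : Int) : PySem.Set Int :=
  (PySem.Set.ofList (pvAt cl i)).foldl
    (fun c x => PySem.Set.update c (ow.getD x [])) PySem.Set.empty

-- 'if j > i: c = len(a & b); if c < len(a) and c < len(b): adj[i].append(j); adj[j].append(i)'
def pvAdjStepB (cl : List (List Int)) (adj : List (List Int)) (i j : Int) : List (List Int) :=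
  if i < j then
    if pvInterLen (pvAt cl i) (pvAt cl j) < pvSetLen (pvAt cl i) ∧
        pvInterLen (pvAt cl i) (pvAt cl j) < pvSetLen (pvAt cl j) then
      let a1 := PySem.List.pySetD adj i (PySem.List.pyGetD adj i [] ++ [j])
      PySem.List.pySetD a1 j (PySem.List.pyGetD a1 j [] ++ [i])
    else adj
  else adj

-- 'adj = [[] for _ in range(n)]; for i in range(n): cand = …; for j in sorted(cand): …'
def pvAdjAlt (cl : List (List Int)) (ow : PySem.Dict Int (List Int)) : List (List Int) :=
  (PySem.List.pyRange 0 (PySem.List.len cl) 1).foldl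
    (fun adj i =>
      (PySem.List.sorted (pvCandSet cl ow i) (fun x => x)).foldl
        (fun adj j => pvAdjStepB cl adj i j) adj)
    ((PySem.List.pyRange 0 (PySem.List.len cl) 1).map (fun _ => []))

-- the 'while q' loop: pop head, mark and record neighbours at discovery
def pvBfsB (adj : List (List Int)) :
    Nat → List Int → List Bool → List Int → List Bool × List Int
  | 0, _, seen, order => (seen, order)
  | _ + 1, [], seen, order => (seen, order)
  | fuel + 1, a :: q', seen, order =>
    let st := (PySem.List.pyGetD adj a []).foldl
      (fun (st : List Int × List Bool × List Int) j =>
        if PySem.List.pyGetD st.2.1 j false then st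
        else (st.1 ++ [j], PySem.List.pySetD st.2.1 j true, st.2.2 ++ [j]))
      (q', seen, order)
    pvBfsB adj fuel st.1 st.2.1 st.2.2

def get_component_alt (cluster_in : List (List Int)) : List (List Int) :=
  let n : Int := PySem.List.len cluster_in
  let adj := pvAdjAlt cluster_in (pvOwners cluster_in)
  let seen0 : List Bool := PySem.List.pyRepeat [false] n
  let st := (PySem.List.pyRange 0 n 1).foldl
    (fun (st : List Bool × List (List Int)) i =>
      if PySem.List.pyGetD st.1 i false then st
      else if PySem.List.len (PySem.List.pyGetD adj i []) = 0 then
        (st.1, PySem.List.pySetD st.2 0 (PySem.List.pyGetD st.2 0 [] ++ [i]))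
      else
        let r := pvBfsB adj (n.toNat + 1) [i] (PySem.List.pySetD st.1 i true) [i]
        (r.1, st.2 ++ [r.2]))
    (seen0, ([[]] : List (List Int)))
  st.2

-- ===== PRECONDITION & SPEC =====
def Spec_get_component (cluster_in : List (List Int)) (out : List (List Int)) : Prop := out = get_component_alt cluster_in
instance (cluster_in : List (List Int)) (out : List (List Int)) : Decidable (Spec_get_component cluster_in out) := by unfold Spec_get_component; infer_instance

-- ===== CLAIM (what is proved, stated in full; the proofs are below) =====
def Claim_equal_get_component : Prop := ∀ (cluster_in : List (List Int)), Dom_get_component cluster_in → Spec_get_component cluster_in (get_component cluster_in)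

-- ===== LEMMAS AND PROOFS =====

-- the conflict condition of both programs, as a Prop
abbrev pvCnd (cl : List (List Int)) (i j : Int) : Prop :=
  0 < pvInterLen (pvAt cl i) (pvAt cl j) ∧
  pvInterLen (pvAt cl i) (pvAt cl j) < pvSetLen (pvAt cl i) ∧
  pvInterLen (pvAt cl i) (pvAt cl j) < pvSetLen (pvAt cl j)

-- the canonical adjacency row both constructions produce
def pvRow (cl : List (List Int)) (v : Int) : List Int :=
  (PySem.List.pyRange 0 (PySem.List.len cl) 1).filter
    (fun j => decide (j ≠ v) && decide (pvCnd cl v j))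

def pvB2I (b : Bool) : Int := if b then 1 else 0

theorem pvInterLen_comm (a b : List Int) : pvInterLen a b = pvInterLen b a := by
  have h1 : (PySem.Set.inter (PySem.Set.ofList a) b).Perm (PySem.Set.inter (PySem.Set.ofList b) a) := by
    simp only [PySem.Set.inter]
    rw [List.perm_ext_iff_of_nodup ((PySem.Set.nodup_ofList a).filter _) ((PySem.Set.nodup_ofList b).filter _)]
    intro x
    simp [List.mem_filter, PySem.Set.mem_ofList, PySem.Set.contains]
    tauto
  simp [pvInterLen, PySem.List.len_eq, h1.length_eq]

theorem pvCnd_comm (cl : List (List Int)) (i j : Int) : pvCnd cl i j ↔ pvCnd cl j i := by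
  unfold pvCnd
  rw [pvInterLen_comm]
  tauto

-- ===== A-side: conflict_dict[v] is the sorted row pvRow =====

def pvPairs (cl : List (List Int)) : List (Int × Int) :=
  (PySem.List.pyRange 0 (PySem.List.len cl - 1) 1).flatMap
    (fun i => (PySem.List.pyRange (i + 1) (PySem.List.len cl) 1).map (fun j => (i, j)))

def pvStepA (cl : List (List Int)) (d : PySem.Dict Int (List Int)) (p : Int × Int) :
    PySem.Dict Int (List Int) :=
  if pvCnd cl p.1 p.2 then
    (d.modify p.1 [] (fun l => l ++ [p.2])).modify p.2 [] (fun l => l ++ [p.1])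
  else d

def pvD0 (cl : List (List Int)) : PySem.Dict Int (List Int) :=
  (PySem.List.pyRange 0 (PySem.List.len cl) 1).foldl (fun d i => d.insert i []) PySem.Dict.empty

def pvContrib (cl : List (List Int)) (v : Int) (p : Int × Int) : List Int :=
  if pvCnd cl p.1 p.2 then (if p.1 = v then [p.2] else if p.2 = v then [p.1] else []) else []

theorem pvConflictDict_eq (cl : List (List Int)) :
    pvConflictDict cl = (pvPairs cl).foldl (pvStepA cl) (pvD0 cl) := by
  unfold pvConflictDict pvPairs pvStepA pvD0
  rw [List.foldl_flatMap]
  simp only [List.foldl_map]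

theorem foldl_pvStepA_getD (cl : List (List Int)) (v : Int) :
    ∀ (ps : List (Int × Int)) (d : PySem.Dict Int (List Int)), (∀ p ∈ ps, p.1 ≠ p.2) →
    ((ps.foldl (pvStepA cl) d).getD v [] = d.getD v [] ++ ps.flatMap (pvContrib cl v)) := by
  intro ps
  induction ps with
  | nil => simp
  | cons p ps ih =>
    intro d hne
    have hne1 : p.1 ≠ p.2 := hne p (by simp)
    rw [List.foldl_cons, ih _ (fun q hq => hne q (by simp [hq])), List.flatMap_cons]
    have hstep : (pvStepA cl d p).getD v [] = d.getD v [] ++ pvContrib cl v p := by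
      unfold pvStepA pvContrib
      by_cases hc : pvCnd cl p.1 p.2
      · rw [if_pos hc, if_pos hc]
        rcases eq_or_ne v p.2 with h2 | h2
        · subst h2
          simp [PySem.Dict.getD_modify, Ne.symm hne1, hne1]
        · rcases eq_or_ne v p.1 with h1 | h1
          · subst h1
            simp [PySem.Dict.getD_modify, h2]
          · simp [PySem.Dict.getD_modify, h1, h2, Ne.symm h1, Ne.symm h2]
      · rw [if_neg hc, if_neg hc]
        simp
    rw [hstep, List.append_assoc]

theorem foldl_pvStepA_keys (cl : List (List Int)) :
    ∀ (ps : List (Int × Int)) (d : PySem.Dict Int (List Int)),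
    (∀ p ∈ ps, p.1 ∈ d.keys ∧ p.2 ∈ d.keys) →
    (ps.foldl (pvStepA cl) d).keys = d.keys := by
  intro ps
  induction ps with
  | nil => simp
  | cons p ps ih =>
    intro d h
    have hk : (pvStepA cl d p).keys = d.keys := by
      unfold pvStepA
      by_cases hc : pvCnd cl p.1 p.2
      · rw [if_pos hc]
        rw [PySem.Dict.keys_modify, PySem.Dict.keys_insert_of_contains, PySem.Dict.keys_modify,
            PySem.Dict.keys_insert_of_contains]
        · rw [(PySem.Dict.contains_iff_mem_keys _ _)]; exact (h p (by simp)).1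
        · rw [(PySem.Dict.contains_iff_mem_keys _ _), PySem.Dict.keys_modify,
              PySem.Dict.keys_insert_of_contains]
          · exact (h p (by simp)).2
          · rw [(PySem.Dict.contains_iff_mem_keys _ _)]; exact (h p (by simp)).1
      · rw [if_neg hc]
    rw [List.foldl_cons, ih _ (by intro q hq; rw [hk]; exact h q (by simp [hq]))]
    exact hk

theorem flatMap_if_singleton (l : List Int) (p : Int → Prop) [DecidablePred p] :
    l.flatMap (fun j => if p j then [j] else []) = l.filter (fun j => decide (p j)) := by
  induction l with
  | nil => rfl
  | cons x l ih =>
    rw [List.flatMap_cons, ih, List.filter_cons]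
    by_cases h : p x
    · simp [h]
    · simp [h]

theorem flatMap_single_hit (v : Int) (g : Int → List Int) :
    ∀ (l : List Int), l.Nodup →
    l.flatMap (fun j => if j = v then g j else []) = if v ∈ l then g v else [] := by
  intro l
  induction l with
  | nil => simp
  | cons x l ih =>
    intro hnd
    rw [List.flatMap_cons, ih hnd.of_cons]
    rcases eq_or_ne x v with rfl | hx
    · simp [(List.nodup_cons.mp hnd).1]
    · simp [hx, Ne.symm hx]

theorem pvPairs_flatMap (cl : List (List Int)) (v : Int) (h0 : 0 ≤ v)
    (h1 : v < PySem.List.len cl) :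
    (pvPairs cl).flatMap (pvContrib cl v) =
      (PySem.List.pyRange 0 v 1).filter (fun j => decide (pvCnd cl j v)) ++
      (PySem.List.pyRange (v + 1) (PySem.List.len cl) 1).filter (fun j => decide (pvCnd cl v j)) := by
  set n := PySem.List.len cl with hn
  unfold pvPairs
  rw [List.flatMap_assoc]
  have hinner : ∀ i : Int, (PySem.List.pyRange (i+1) n 1).flatMap (fun j => pvContrib cl v (i, j))
      = if i = v then (PySem.List.pyRange (v+1) n 1).filter (fun j => decide (pvCnd cl v j))
        else if i < v ∧ pvCnd cl i v then [i] else [] := by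
    intro i
    rcases eq_or_ne i v with rfl | hiv
    · rw [if_pos rfl, ← flatMap_if_singleton (PySem.List.pyRange (i+1) n 1) (pvCnd cl i)]
      apply List.flatMap_congr
      intro j _
      simp only [pvContrib]
      by_cases hc : pvCnd cl i j
      · simp
      · simp [hc]
    · rw [if_neg hiv]
      have hcongr : ∀ j ∈ PySem.List.pyRange (i+1) n 1,
          pvContrib cl v (i, j) =
          (fun j => if j = v then (if pvCnd cl i v then [i] else []) else []) j := by
        intro j _
        simp only [pvContrib]
        rcases eq_or_ne j v with rfl | hjv
        · simp [hiv]
        · by_cases hc : pvCnd cl i j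
          · simp [hiv, hjv]
          · simp [hc, hjv]
      rw [List.flatMap_congr hcongr,
          flatMap_single_hit v _ _ (PySem.List.nodup_pyRange_one _ _)]
      simp only [PySem.List.mem_pyRange_one]
      have hiff : (i + 1 ≤ v ∧ v < n) ↔ i < v := by omega
      simp only [hiff]
      by_cases hlt : i < v <;> by_cases hc : pvCnd cl i v <;> simp [hlt, hc]
  have houter : ∀ i ∈ PySem.List.pyRange 0 (n - 1) 1,
      ((PySem.List.pyRange (i+1) n 1).map (fun j => (i, j))).flatMap (pvContrib cl v)
      = (fun i => if i = v then (PySem.List.pyRange (v+1) n 1).filter (fun j => decide (pvCnd cl v j))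
          else if i < v ∧ pvCnd cl i v then [i] else []) i := by
    intro i _
    rw [List.flatMap_map]
    exact hinner i
  rw [List.flatMap_congr houter,
      PySem.List.pyRange_one_append 0 v (n - 1) h0 (by omega), List.flatMap_append]
  have hpart1 : (PySem.List.pyRange 0 v 1).flatMap
      (fun i => if i = v then (PySem.List.pyRange (v+1) n 1).filter (fun j => decide (pvCnd cl v j))
          else if i < v ∧ pvCnd cl i v then [i] else [])
      = (PySem.List.pyRange 0 v 1).filter (fun j => decide (pvCnd cl j v)) := by
    rw [← flatMap_if_singleton (PySem.List.pyRange 0 v 1) (fun j => pvCnd cl j v)]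
    apply List.flatMap_congr
    intro i hi
    rw [PySem.List.mem_pyRange_one] at hi
    have hne : i ≠ v := by omega
    by_cases hc : pvCnd cl i v <;> simp [hne, hi.2, hc]
  rw [hpart1]
  rcases lt_or_eq_of_le (show v ≤ n - 1 by omega) with hvlt | hveq
  · rw [show PySem.List.pyRange v (n-1) 1 = v :: PySem.List.pyRange (v+1) (n-1) 1 from
        PySem.List.pyRange_one_cons hvlt, List.flatMap_cons]
    have htail : (PySem.List.pyRange (v+1) (n-1) 1).flatMap
        (fun i => if i = v then (PySem.List.pyRange (v+1) n 1).filter (fun j => decide (pvCnd cl v j))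
            else if i < v ∧ pvCnd cl i v then [i] else []) = [] := by
      rw [List.flatMap_congr (g := fun _ => []) (fun i hi => by
        rw [PySem.List.mem_pyRange_one] at hi
        have h1 : i ≠ v := by omega
        have h2 : ¬ (i < v ∧ pvCnd cl i v) := by
          rintro ⟨h, -⟩; omega
        simp [h1, h2])]
      simp
    rw [htail, if_pos rfl, List.append_nil]
  · rw [show PySem.List.pyRange v (n-1) 1 = [] from PySem.List.pyRange_one_eq_nil (by omega),
        show PySem.List.pyRange (v+1) n 1 = [] from PySem.List.pyRange_one_eq_nil (by omega)]
    simp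

theorem foldl_insert_nil_getD (v : Int) :
    ∀ (l : List Int) (d : PySem.Dict Int (List Int)), (∀ k, d.getD k [] = []) →
    (l.foldl (fun d i => d.insert i []) d).getD v [] = [] := by
  intro l
  induction l with
  | nil => intro d h; exact h v
  | cons x l ih =>
    intro d h
    rw [List.foldl_cons]
    exact ih _ (fun k => by rw [PySem.Dict.getD_insert]; split <;> simp [h])

theorem pvD0_getD (cl : List (List Int)) (v : Int) : (pvD0 cl).getD v [] = [] :=
  foldl_insert_nil_getD v _ _ (fun k => by simp [PySem.Dict.getD_empty])

theorem pvPairs_ne (cl : List (List Int)) : ∀ p ∈ pvPairs cl, p.1 ≠ p.2 := by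
  intro p hp
  unfold pvPairs at hp
  rw [List.mem_flatMap] at hp
  obtain ⟨i, hi, hpi⟩ := hp
  rw [List.mem_map] at hpi
  obtain ⟨j, hj, rfl⟩ := hpi
  rw [PySem.List.mem_pyRange_one] at hj
  simp only []
  omega

-- both programs' pair contributions flatten to the sorted row pvRow
theorem pvContrib_flatMap_eq_pvRow (cl : List (List Int)) (v : Int) (h0 : 0 ≤ v)
    (h1 : v < PySem.List.len cl) :
    (pvPairs cl).flatMap (pvContrib cl v) = pvRow cl v := by
  rw [pvPairs_flatMap cl v h0 h1]
  unfold pvRow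
  rw [PySem.List.pyRange_one_append 0 v (PySem.List.len cl) h0 (by omega),
      show PySem.List.pyRange v (PySem.List.len cl) 1
        = v :: PySem.List.pyRange (v+1) (PySem.List.len cl) 1 from
        PySem.List.pyRange_one_cons h1,
      List.filter_append, List.filter_cons]
  simp only [ne_eq, not_true_eq_false, decide_false, Bool.false_and,
    Bool.false_eq_true, if_false]
  congr 1
  · apply List.filter_congr
    intro j hj
    rw [PySem.List.mem_pyRange_one] at hj
    have hne : j ≠ v := by omega
    simp [hne, decide_eq_decide.mpr (pvCnd_comm cl v j)]
  · apply List.filter_congr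
    intro j hj
    rw [PySem.List.mem_pyRange_one] at hj
    have hne : j ≠ v := by omega
    simp [hne]

theorem pvConflictDict_getD (cl : List (List Int)) (v : Int) (h0 : 0 ≤ v)
    (h1 : v < PySem.List.len cl) :
    (pvConflictDict cl).getD v [] = pvRow cl v := by
  rw [pvConflictDict_eq, foldl_pvStepA_getD cl v _ _ (pvPairs_ne cl), pvD0_getD,
      List.nil_append, pvContrib_flatMap_eq_pvRow cl v h0 h1]

theorem pvPairs_bounds (cl : List (List Int)) : ∀ p ∈ pvPairs cl,
    0 ≤ p.1 ∧ p.1 < PySem.List.len cl ∧ 0 ≤ p.2 ∧ p.2 < PySem.List.len cl := by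
  intro p hp
  unfold pvPairs at hp
  rw [List.mem_flatMap] at hp
  obtain ⟨i, hi, hpi⟩ := hp
  rw [List.mem_map] at hpi
  obtain ⟨j, hj, rfl⟩ := hpi
  rw [PySem.List.mem_pyRange_one] at hi hj
  simp only []
  omega

theorem pvD0_keys (cl : List (List Int)) :
    (pvD0 cl).keys = PySem.List.pyRange 0 (PySem.List.len cl) 1 := by
  unfold pvD0
  rw [PySem.Dict.keys_foldl_insert (f := fun _ _ => ([] : List Int))]
  rw [PySem.Dict.keys_empty, PySem.Set.update_nil_left,
      PySem.Set.ofList_eq_self_of_nodup _ (PySem.List.nodup_pyRange_one _ _)]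

theorem pvConflictDict_size (cl : List (List Int)) :
    PySem.Dict.size (pvConflictDict cl) = cl.length := by
  have hk : (pvConflictDict cl).keys = PySem.List.pyRange 0 (PySem.List.len cl) 1 := by
    rw [pvConflictDict_eq, foldl_pvStepA_keys cl _ _ (fun p hp => by
      rw [pvD0_keys, PySem.List.mem_pyRange_one, PySem.List.mem_pyRange_one]
      have := pvPairs_bounds cl p hp
      exact ⟨⟨this.1, this.2.1⟩, this.2.2⟩), pvD0_keys]
  have : (pvConflictDict cl).keys.length = cl.length := by
    rw [hk, PySem.List.length_pyRange_one]
    simp [PySem.List.len_eq]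
  simpa [PySem.Dict.keys, PySem.Dict.size] using this

-- ===== B-side: the inverted index produces the same row pvRow =====

-- 0 < |a & b| iff a and b share an element
theorem pvInterLen_pos_iff (a b : List Int) :
    0 < pvInterLen a b ↔ ∃ x ∈ a, x ∈ b := by
  unfold pvInterLen
  rw [PySem.List.len_eq]
  simp only [PySem.Set.inter]
  rw [Int.lt_iff_add_one_le, zero_add]
  constructor
  · intro h
    have : ((PySem.Set.ofList a).filter (fun x => PySem.Set.contains b x)) ≠ [] := by
      intro hnil
      rw [hnil] at h
      simp at h
    obtain ⟨x, hx⟩ := List.exists_mem_of_ne_nil _ this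
    rw [List.mem_filter] at hx
    exact ⟨x, (PySem.Set.mem_ofList a x).mp hx.1, by
      simpa [PySem.Set.contains, List.contains_iff_mem] using hx.2⟩
  · rintro ⟨x, hxa, hxb⟩
    have hx : x ∈ (PySem.Set.ofList a).filter (fun x => PySem.Set.contains b x) := by
      rw [List.mem_filter]
      exact ⟨(PySem.Set.mem_ofList a x).mpr hxa, by
        simpa [PySem.Set.contains, List.contains_iff_mem] using hxb⟩
    have := List.length_pos_of_mem hx
    omega

-- one element-step of the owners build
theorem pvOwnStep_getD (i : Int) (d : PySem.Dict Int (List Int)) (x y : Int) :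
    (pvOwnStep i d y).getD x [] = d.getD x [] ++ (if x = y then [i] else []) := by
  unfold pvOwnStep
  by_cases hc : d.contains y
  · rw [if_pos hc, PySem.Dict.getD_modify]
    split <;> simp_all
  · rw [if_neg hc, PySem.Dict.getD_insert]
    rcases eq_or_ne x y with rfl | hxy
    · have : d.getD x [] = [] := by
        rw [PySem.Dict.getD_eq_get?_getD]
        have := PySem.Dict.contains_eq_isSome_get? d x
        cases h : d.get? x
        · simp
        · rw [h] at this; simp [this] at hc
      simp [this]
    · simp [hxy]

theorem foldl_pvOwnStep_getD (i x : Int) :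
    ∀ (es : List Int), es.Nodup → ∀ (d : PySem.Dict Int (List Int)),
    (es.foldl (pvOwnStep i) d).getD x [] = d.getD x [] ++ (if x ∈ es then [i] else []) := by
  intro es
  induction es with
  | nil => intro _ d; simp
  | cons y es ih =>
    intro hnd d
    rw [List.foldl_cons, ih hnd.of_cons, pvOwnStep_getD]
    rcases eq_or_ne x y with rfl | hxy
    · have hnx : x ∉ es := (List.nodup_cons.mp hnd).1
      simp [hnx]
    · simp [hxy]

theorem pvOwners_getD (cl : List (List Int)) (x : Int) :
    (pvOwners cl).getD x []
      = (PySem.List.pyRange 0 (PySem.List.len cl) 1).filter (fun t => decide (x ∈ pvAt cl t)) := by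
  unfold pvOwners
  have hgen : ∀ (L : List Int) (d : PySem.Dict Int (List Int)),
      (L.foldl (fun d i => (PySem.Set.ofList (pvAt cl i)).foldl (pvOwnStep i) d) d).getD x []
        = d.getD x [] ++ L.filter (fun t => decide (x ∈ pvAt cl t)) := by
    intro L
    induction L with
    | nil => intro d; simp
    | cons i L ih =>
      intro d
      rw [List.foldl_cons, ih, foldl_pvOwnStep_getD i x _ (PySem.Set.nodup_ofList _),
          List.filter_cons]
      by_cases hm : x ∈ pvAt cl i <;> simp [hm, PySem.Set.mem_ofList]
  rw [hgen, PySem.Dict.getD_empty, List.nil_append]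

theorem mem_pvOwners (cl : List (List Int)) (x j : Int) :
    j ∈ (pvOwners cl).getD x [] ↔ (0 ≤ j ∧ j < PySem.List.len cl) ∧ x ∈ pvAt cl j := by
  rw [pvOwners_getD, List.mem_filter, PySem.List.mem_pyRange_one]
  simp

-- candidate-set membership: j is a candidate of i iff the two sets share an element
theorem mem_pvCandSet (cl : List (List Int)) (i j : Int) :
    j ∈ pvCandSet cl (pvOwners cl) i
      ↔ ∃ x ∈ pvAt cl i, (0 ≤ j ∧ j < PySem.List.len cl) ∧ x ∈ pvAt cl j := by
  unfold pvCandSet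
  have hgen : ∀ (es : List Int) (c : PySem.Set Int),
      j ∈ es.foldl (fun c x => PySem.Set.update c ((pvOwners cl).getD x [])) c
        ↔ j ∈ c ∨ ∃ x ∈ es, j ∈ (pvOwners cl).getD x [] := by
    intro es
    induction es with
    | nil => intro c; simp
    | cons x es ih =>
      intro c
      rw [List.foldl_cons, ih, PySem.Set.mem_update]
      simp
      tauto
  rw [hgen]
  simp only [PySem.Set.empty]
  constructor
  · rintro (h | ⟨x, hx, hj⟩)
    · simp at h
    · exact ⟨x, (PySem.Set.mem_ofList _ x).mp hx, (mem_pvOwners cl x j).mp hj⟩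
  · rintro ⟨x, hx, hj⟩
    exact Or.inr ⟨x, (PySem.Set.mem_ofList _ x).mpr hx, (mem_pvOwners cl x j).mpr hj⟩

theorem nodup_pvCandSet (cl : List (List Int)) (i : Int) :
    (pvCandSet cl (pvOwners cl) i).Nodup := by
  unfold pvCandSet
  have hgen : ∀ (es : List Int) (c : PySem.Set Int), c.Nodup →
      (es.foldl (fun c x => PySem.Set.update c ((pvOwners cl).getD x [])) c).Nodup := by
    intro es
    induction es with
    | nil => intro c h; exact h
    | cons x es ih => intro c h; exact ih _ (PySem.Set.nodup_update _ _ h)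
  exact hgen _ _ (by simp [PySem.Set.empty])

-- sorted(cand) is exactly the ascending list of j < n sharing an element with set i
theorem sorted_pvCandSet (cl : List (List Int)) (i : Int) :
    PySem.List.sorted (pvCandSet cl (pvOwners cl) i) (fun x => x)
      = (PySem.List.pyRange 0 (PySem.List.len cl) 1).filter
          (fun j => decide (0 < pvInterLen (pvAt cl i) (pvAt cl j))) := by
  apply PySem.List.sorted_eq_of_perm_of_pairwise_lt
  · rw [List.perm_ext_iff_of_nodup ((PySem.List.nodup_pyRange_one _ _).filter _)
        (nodup_pvCandSet cl i)]
    intro j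
    rw [List.mem_filter, PySem.List.mem_pyRange_one, mem_pvCandSet, decide_eq_true_eq,
        pvInterLen_pos_iff]
    tauto
  · exact (PySem.List.pairwise_lt_pyRange_one 0 (PySem.List.len cl)).filter _

-- B's per-pair contribution to row v (no positivity test: candidacy already implies it)
def pvContribB (cl : List (List Int)) (v : Int) (p : Int × Int) : List Int :=
  if p.1 < p.2 ∧ pvInterLen (pvAt cl p.1) (pvAt cl p.2) < pvSetLen (pvAt cl p.1) ∧
      pvInterLen (pvAt cl p.1) (pvAt cl p.2) < pvSetLen (pvAt cl p.2) then
    (if p.1 = v then [p.2] else if p.2 = v then [p.1] else [])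
  else []

def pvPairsB (cl : List (List Int)) (ow : PySem.Dict Int (List Int)) : List (Int × Int) :=
  (PySem.List.pyRange 0 (PySem.List.len cl) 1).flatMap
    (fun i => (PySem.List.sorted (pvCandSet cl ow i) (fun x => x)).map (fun j => (i, j)))

theorem pvAdjAlt_eq_foldl (cl : List (List Int)) (ow : PySem.Dict Int (List Int)) :
    pvAdjAlt cl ow = (pvPairsB cl ow).foldl (fun adj p => pvAdjStepB cl adj p.1 p.2)
      ((PySem.List.pyRange 0 (PySem.List.len cl) 1).map (fun _ => [])) := by
  unfold pvAdjAlt pvPairsB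
  rw [List.foldl_flatMap]
  simp only [List.foldl_map]

theorem pvAdjStepB_length (cl : List (List Int)) (adj : List (List Int)) (i j : Int) :
    (pvAdjStepB cl adj i j).length = adj.length := by
  unfold pvAdjStepB
  split_ifs <;> simp [PySem.List.length_pySetD]

theorem foldl_pvAdjStepB_length (cl : List (List Int)) :
    ∀ (ps : List (Int × Int)) (adj : List (List Int)),
    (ps.foldl (fun adj p => pvAdjStepB cl adj p.1 p.2) adj).length = adj.length := by
  intro ps
  induction ps with
  | nil => intro adj; rfl
  | cons p ps ih =>
    intro adj
    rw [List.foldl_cons, ih, pvAdjStepB_length]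

-- xs[i] = w; then read index m (both indices nonnegative) — Int-index form of pyGetD_pySetD_natCast
theorem pvGetSetD (xs : List (List Int)) (i : Int) (w : List Int) (m : Int)
    (hi0 : 0 ≤ i) (hi1 : i < (xs.length : Int)) (hm : 0 ≤ m) :
    PySem.List.pyGetD (PySem.List.pySetD xs i w) m []
      = if m = i then w else PySem.List.pyGetD xs m [] := by
  have h1 : i = ((i.toNat : Nat) : Int) := by omega
  have h2 : m = ((m.toNat : Nat) : Int) := by omega
  rw [h1, h2, PySem.List.pyGetD_pySetD_natCast _ _ _ _ _ (by omega)]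
  by_cases h : m.toNat = i.toNat
  · rw [if_pos h, if_pos (by omega : ((m.toNat : Nat) : Int) = ((i.toNat : Nat) : Int))]
  · rw [if_neg h, if_neg (by omega : ¬ ((m.toNat : Nat) : Int) = ((i.toNat : Nat) : Int))]

theorem pvAdjStepB_getD (cl : List (List Int)) (adj : List (List Int)) (i j v : Int)
    (hi0 : 0 ≤ i) (hi1 : i < (adj.length : Int))
    (hj0 : 0 ≤ j) (hj1 : j < (adj.length : Int)) (hv : 0 ≤ v) :
    PySem.List.pyGetD (pvAdjStepB cl adj i j) v []
      = PySem.List.pyGetD adj v [] ++ pvContribB cl v (i, j) := by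
  unfold pvAdjStepB pvContribB
  by_cases hij : i < j
  · by_cases hsz : pvInterLen (pvAt cl i) (pvAt cl j) < pvSetLen (pvAt cl i) ∧
        pvInterLen (pvAt cl i) (pvAt cl j) < pvSetLen (pvAt cl j)
    · simp only [hij, hsz, and_self, if_true]
      have hA1 : ((PySem.List.pySetD adj i (PySem.List.pyGetD adj i [] ++ [j])).length : Int)
          = (adj.length : Int) := by rw [PySem.List.length_pySetD]
      rw [pvGetSetD _ j _ v hj0 (by rw [hA1]; exact hj1) hv,
          pvGetSetD adj i _ j hi0 hi1 hj0,
          pvGetSetD adj i _ v hi0 hi1 hv,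
          if_neg (by omega : ¬ (j = i))]
      rcases eq_or_ne v j with rfl | hvj
      · rw [if_pos rfl, if_neg (by omega : ¬ (i = v)), if_pos rfl]
      · rw [if_neg hvj]
        rcases eq_or_ne v i with rfl | hvi
        · rw [if_pos rfl, if_pos rfl]
        · rw [if_neg hvi, if_neg (by omega : ¬ (i = v)),
              if_neg (by omega : ¬ (j = v)), List.append_nil]
    · simp only [hij, true_and, if_neg hsz]
      simp
  · simp only [if_neg hij]
    simp [hij]

theorem foldl_pvAdjStepB_getD (cl : List (List Int)) (v : Int) (hv : 0 ≤ v) :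
    ∀ (ps : List (Int × Int)) (adj : List (List Int)),
    (∀ p ∈ ps, 0 ≤ p.1 ∧ p.1 < (adj.length : Int) ∧ 0 ≤ p.2 ∧ p.2 < (adj.length : Int)) →
    PySem.List.pyGetD (ps.foldl (fun adj p => pvAdjStepB cl adj p.1 p.2) adj) v []
      = PySem.List.pyGetD adj v [] ++ ps.flatMap (pvContribB cl v) := by
  intro ps
  induction ps with
  | nil => intro adj _; simp
  | cons p ps ih =>
    intro adj hb
    obtain ⟨h1, h2, h3, h4⟩ := hb p (by simp)
    rw [List.foldl_cons, ih _ (fun q hq => by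
        rw [pvAdjStepB_length]
        exact hb q (by simp [hq])),
      pvAdjStepB_getD cl adj p.1 p.2 v h1 h2 h3 h4 hv, List.flatMap_cons, List.append_assoc]

theorem pvPairsB_bounds (cl : List (List Int)) : ∀ p ∈ pvPairsB cl (pvOwners cl),
    0 ≤ p.1 ∧ p.1 < PySem.List.len cl ∧ 0 ≤ p.2 ∧ p.2 < PySem.List.len cl := by
  intro p hp
  unfold pvPairsB at hp
  rw [List.mem_flatMap] at hp
  obtain ⟨i, hi, hpi⟩ := hp
  rw [List.mem_map] at hpi
  obtain ⟨j, hj, rfl⟩ := hpi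
  rw [PySem.List.mem_pyRange_one] at hi
  rw [PySem.List.mem_sorted, mem_pvCandSet] at hj
  obtain ⟨x, -, hjb, -⟩ := hj
  exact ⟨hi.1, hi.2, hjb.1, hjb.2⟩

-- (sorted candidates).flatMap over f = full range flatMap with the positivity test inlined
theorem flatMap_filter_if (l : List Int) (p : Int → Prop) [DecidablePred p]
    (f : Int → List Int) :
    (l.filter (fun x => decide (p x))).flatMap f
      = l.flatMap (fun x => if p x then f x else []) := by
  induction l with
  | nil => rfl
  | cons x l ih =>
    rw [List.filter_cons, List.flatMap_cons]
    by_cases h : p x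
    · simp only [h, decide_true, if_true, List.flatMap_cons, ih]
    · simp only [h, decide_false, if_false, ih, List.nil_append, Bool.false_eq_true]

theorem pvPairsB_flatMap (cl : List (List Int)) (v : Int) :
    (pvPairsB cl (pvOwners cl)).flatMap (pvContribB cl v)
      = (pvPairs cl).flatMap (pvContrib cl v) := by
  set n := PySem.List.len cl with hn
  have hn0 : 0 ≤ n := by simp [hn, PySem.List.len_eq]
  set G : Int → Int → List Int := fun i j =>
    if i < j ∧ pvCnd cl i j then (if i = v then [j] else if j = v then [i] else []) else []
    with hG
  set Fi : Int → List Int := fun i => (PySem.List.pyRange 0 n 1).flatMap (G i) with hFi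
  unfold pvPairsB pvPairs
  rw [List.flatMap_assoc, List.flatMap_assoc]
  have hinner : ∀ i : Int,
      ((PySem.List.sorted (pvCandSet cl (pvOwners cl) i) (fun x => x)).map
        (fun j => (i, j))).flatMap (pvContribB cl v) = Fi i := by
    intro i
    rw [hFi]
    simp only []
    rw [List.flatMap_map, sorted_pvCandSet,
        flatMap_filter_if _ (fun j => 0 < pvInterLen (pvAt cl i) (pvAt cl j))]
    apply List.flatMap_congr
    intro j _
    rw [hG]
    simp only []
    by_cases hpos : 0 < pvInterLen (pvAt cl i) (pvAt cl j)
    · rw [if_pos hpos]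
      unfold pvContribB pvCnd
      by_cases hij : i < j <;>
        by_cases hsz : pvInterLen (pvAt cl i) (pvAt cl j) < pvSetLen (pvAt cl i) ∧
            pvInterLen (pvAt cl i) (pvAt cl j) < pvSetLen (pvAt cl j) <;>
        simp [hij, hsz, hpos]
    · rw [if_neg hpos, if_neg (by rintro ⟨-, h, -⟩; exact hpos h)]
  have hinnerA : ∀ i ∈ PySem.List.pyRange 0 (n - 1) 1,
      ((PySem.List.pyRange (i + 1) n 1).map (fun j => (i, j))).flatMap (pvContrib cl v)
        = Fi i := by
    intro i hi
    rw [PySem.List.mem_pyRange_one] at hi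
    rw [hFi]
    simp only []
    rw [List.flatMap_map]
    have hsp := congrArg (fun l => l.flatMap (G i))
      (PySem.List.pyRange_one_append 0 (i + 1) n (by omega) (by omega))
    simp only [List.flatMap_append] at hsp
    rw [hsp]
    have hlo : (PySem.List.pyRange 0 (i + 1) 1).flatMap (G i) = [] := by
      rw [List.flatMap_congr (g := fun _ => []) (fun j hj => by
        rw [PySem.List.mem_pyRange_one] at hj
        rw [hG]
        simp only []
        rw [if_neg (by rintro ⟨h, -⟩; omega)])]
      simp
    rw [hlo, List.nil_append]
    apply List.flatMap_congr
    intro j hj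
    rw [PySem.List.mem_pyRange_one] at hj
    unfold pvContrib
    rw [hG]
    simp only []
    have hij2 : i < j := by omega
    by_cases hc : pvCnd cl i j <;> simp [hc, hij2]
  rw [List.flatMap_congr (fun i _ => hinner i), List.flatMap_congr hinnerA]
  rcases eq_or_lt_of_le hn0 with hzero | hpos
  · rw [show PySem.List.pyRange 0 n 1 = [] from PySem.List.pyRange_one_eq_nil (by omega),
        show PySem.List.pyRange 0 (n - 1) 1 = [] from PySem.List.pyRange_one_eq_nil (by omega)]
  · have hsp := congrArg (fun l => l.flatMap Fi)
      (PySem.List.pyRange_one_append 0 (n - 1) n (by omega) (by omega))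
    simp only [List.flatMap_append] at hsp
    rw [hsp]
    have hlast : (PySem.List.pyRange (n - 1) n 1).flatMap Fi = [] := by
      rw [List.flatMap_congr (g := fun _ => []) (fun i hi => by
        rw [PySem.List.mem_pyRange_one] at hi
        rw [hFi]
        simp only []
        rw [List.flatMap_congr (g := fun _ => []) (fun j hj => by
          rw [PySem.List.mem_pyRange_one] at hj
          rw [hG]
          simp only []
          rw [if_neg (by rintro ⟨h, -⟩; omega)])]
        simp)]
      simp
    rw [hlast, List.append_nil]

theorem pvAdjAlt_length (cl : List (List Int)) (ow : PySem.Dict Int (List Int)) :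
    (pvAdjAlt cl ow).length = cl.length := by
  rw [pvAdjAlt_eq_foldl, foldl_pvAdjStepB_length, List.length_map,
      PySem.List.length_pyRange_one]
  simp [PySem.List.len_eq]

theorem pvAdjAlt_getD (cl : List (List Int)) (v : Int) (h0 : 0 ≤ v)
    (h1 : v < PySem.List.len cl) :
    PySem.List.pyGetD (pvAdjAlt cl (pvOwners cl)) v [] = pvRow cl v := by
  have hlen : ((PySem.List.pyRange 0 (PySem.List.len cl) 1).map
      (fun _ => ([] : List Int))).length = cl.length := by
    rw [List.length_map, PySem.List.length_pyRange_one]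
    simp [PySem.List.len_eq]
  rw [pvAdjAlt_eq_foldl,
      foldl_pvAdjStepB_getD cl v h0 _ _ (fun p hp => by
        rw [hlen]
        have := pvPairsB_bounds cl p hp
        simp only [PySem.List.len_eq] at this
        exact ⟨this.1, this.2.1, this.2.2.1, this.2.2.2⟩),
      PySem.List.pyGetD_map_pyRange_of_nonneg _ _ _ _ h0 h1, List.nil_append,
      pvPairsB_flatMap cl v, pvContrib_flatMap_eq_pvRow cl v h0 h1]

theorem pvAdjAlt_bounds (cl : List (List Int)) :
    ∀ row ∈ pvAdjAlt cl (pvOwners cl), ∀ j ∈ row, 0 ≤ j ∧ j < PySem.List.len cl := by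
  intro row hrow j hj
  obtain ⟨k, hk, hke⟩ := List.mem_iff_getElem.mp hrow
  have hkl : (k : Int) < PySem.List.len cl := by
    rw [pvAdjAlt_length] at hk
    simp only [PySem.List.len_eq]
    omega
  have hrowv : row = pvRow cl (k : Int) := by
    rw [← hke, ← pvAdjAlt_getD cl (k : Int) (by omega) hkl,
        PySem.List.pyGetD_eq_getElem _ _ (by omega)
          (by rw [pvAdjAlt_length]; rw [pvAdjAlt_length] at hk; simpa using hkl)]
    simp
  rw [hrowv] at hj
  unfold pvRow at hj
  rw [List.mem_filter, PySem.List.mem_pyRange_one] at hj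
  exact hj.1

-- ===== the BFS passes agree =====

theorem pvGetD_map_b2i (seen : List Bool) (j : Int) (h0 : 0 ≤ j)
    (h1 : j < (seen.length : Int)) :
    (PySem.List.pyGetD (seen.map pvB2I) j 0 = 0) ↔ (PySem.List.pyGetD seen j false = false) := by
  rw [PySem.List.pyGetD_eq_getElem _ _ h0 (by simpa using h1),
      PySem.List.pyGetD_eq_getElem _ _ h0 h1]
  rw [List.getElem_map]
  cases seen[j.toNat] <;> simp [pvB2I]

theorem pvSetD_map_b2i (seen : List Bool) (j : Int) (h0 : 0 ≤ j) :
    PySem.List.pySetD (seen.map pvB2I) j 1 = (PySem.List.pySetD seen j true).map pvB2I := by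
  rw [PySem.List.pySetD_of_nonneg _ _ h0, PySem.List.pySetD_of_nonneg _ _ h0]
  rw [show (1 : Int) = pvB2I true from rfl, List.map_set]

theorem pvComp_get_last (pre : List (List Int)) (order : List Int) :
    PySem.List.pyGetD (pre ++ [order]) (pre.length : Int) [] = order := by
  rw [PySem.List.pyGetD_natCast]
  simp [List.getD]

theorem pvComp_set_last (pre : List (List Int)) (order v : List Int) :
    PySem.List.pySetD (pre ++ [order]) (pre.length : Int) v = pre ++ [v] := by
  rw [PySem.List.pySetD_natCast]
  rw [List.set_append]
  simp

theorem pvInner_rel (n : Int) (pre : List (List Int)) :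
    ∀ (l q : List Int) (seen : List Bool) (order : List Int),
    (∀ j ∈ l, 0 ≤ j ∧ j < n) → (seen.length : Int) = n →
    (l.foldl (fun (st : List Int × List Int × List (List Int)) j =>
        if PySem.List.pyGetD st.2.1 j 0 = 0 then
          (st.1 ++ [j], PySem.List.pySetD st.2.1 j 1,
           PySem.List.pySetD st.2.2 (pre.length : Int)
             (PySem.List.pyGetD st.2.2 (pre.length : Int) [] ++ [j]))
        else st) (q, seen.map pvB2I, pre ++ [order]))
    = ((l.foldl (fun (st : List Int × List Bool × List Int) j =>
        if PySem.List.pyGetD st.2.1 j false then st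
        else (st.1 ++ [j], PySem.List.pySetD st.2.1 j true, st.2.2 ++ [j])) (q, seen, order)).1, (l.foldl (fun (st : List Int × List Bool × List Int) j =>
        if PySem.List.pyGetD st.2.1 j false then st
        else (st.1 ++ [j], PySem.List.pySetD st.2.1 j true, st.2.2 ++ [j])) (q, seen, order)).2.1.map pvB2I, pre ++ [(l.foldl (fun (st : List Int × List Bool × List Int) j =>
        if PySem.List.pyGetD st.2.1 j false then st
        else (st.1 ++ [j], PySem.List.pySetD st.2.1 j true, st.2.2 ++ [j])) (q, seen, order)).2.2]) := by
  intro l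
  induction l with
  | nil => intro q seen order _ _; rfl
  | cons j l ih =>
    intro q seen order hb hlen
    obtain ⟨hj0, hj1⟩ := hb j (by simp)
    rw [List.foldl_cons, List.foldl_cons]
    by_cases hseen : PySem.List.pyGetD seen j false
    · have hA : ¬ (PySem.List.pyGetD (seen.map pvB2I) j 0 = 0) := by
        rw [pvGetD_map_b2i seen j hj0 (by omega)]
        simp [hseen]
      simp only [if_neg hA, if_pos hseen]
      exact ih q seen order (fun x hx => hb x (by simp [hx])) hlen
    · have hA : PySem.List.pyGetD (seen.map pvB2I) j 0 = 0 := by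
        rw [pvGetD_map_b2i seen j hj0 (by omega)]
        simpa using hseen
      simp only [if_pos hA, if_neg hseen]
      have e1 : PySem.List.pySetD (seen.map pvB2I) j 1 = (PySem.List.pySetD seen j true).map pvB2I :=
        pvSetD_map_b2i seen j hj0
      have e2 : PySem.List.pySetD (pre ++ [order]) (pre.length : Int)
          (PySem.List.pyGetD (pre ++ [order]) (pre.length : Int) [] ++ [j]) = pre ++ [order ++ [j]] := by
        rw [pvComp_get_last, pvComp_set_last]
      simp only [e1, e2]
      have hlen' : ((PySem.List.pySetD seen j true).length : Int) = n := by
        rw [PySem.List.pySetD_of_nonneg _ _ hj0, List.length_set]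
        exact hlen
      exact ih (q ++ [j]) (PySem.List.pySetD seen j true) (order ++ [j])
        (fun x hx => hb x (by simp [hx])) hlen'

theorem pvInnerB_inv (n : Int) :
    ∀ (l q : List Int) (seen : List Bool) (order : List Int),
    (∀ a ∈ q, 0 ≤ a ∧ a < n) → (∀ j ∈ l, 0 ≤ j ∧ j < n) →
    (∀ a ∈ (l.foldl (fun (st : List Int × List Bool × List Int) j =>
        if PySem.List.pyGetD st.2.1 j false then st
        else (st.1 ++ [j], PySem.List.pySetD st.2.1 j true, st.2.2 ++ [j])) (q, seen, order)).1,
        0 ≤ a ∧ a < n) ∧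
    ((l.foldl (fun (st : List Int × List Bool × List Int) j =>
        if PySem.List.pyGetD st.2.1 j false then st
        else (st.1 ++ [j], PySem.List.pySetD st.2.1 j true, st.2.2 ++ [j])) (q, seen, order)).2.1.length
      = seen.length) := by
  intro l
  induction l with
  | nil => intro q seen order hq _; exact ⟨hq, rfl⟩
  | cons j l ih =>
    intro q seen order hq hb
    rw [List.foldl_cons]
    by_cases hseen : PySem.List.pyGetD seen j false
    · simp only [if_pos hseen]
      exact ih q seen order hq (fun x hx => hb x (by simp [hx]))
    · simp only [if_neg hseen]
      have := ih (q ++ [j]) (PySem.List.pySetD seen j true) (order ++ [j])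
        (fun x hx => by
          rcases List.mem_append.mp hx with h | h
          · exact hq x h
          · rw [List.mem_singleton] at h; subst h; exact hb x (by simp))
        (fun x hx => hb x (by simp [hx]))
      refine ⟨this.1, ?_⟩
      rw [this.2, PySem.List.pySetD_of_nonneg _ _ (hb j (by simp)).1, List.length_set]

theorem pvAdjRow_bounds (adj : List (List Int)) (n : Int)
    (hadj : ∀ row ∈ adj, ∀ j ∈ row, 0 ≤ j ∧ j < n) (a : Int) :
    ∀ j ∈ PySem.List.pyGetD adj a [], 0 ≤ j ∧ j < n := by
  intro j hj
  unfold PySem.List.pyGetD at hj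
  cases h : PySem.List.pyGet? adj a with
  | none => rw [h] at hj; simp at hj
  | some row =>
    rw [h] at hj
    exact hadj row (PySem.List.mem_of_pyGet?_eq_some _ h) j hj

theorem pvBfs_rel (d : PySem.Dict Int (List Int)) (adj : List (List Int)) (n : Int)
    (hl : ∀ a : Int, 0 ≤ a → a < n → d.getD a [] = PySem.List.pyGetD adj a [])
    (hadj : ∀ row ∈ adj, ∀ j ∈ row, 0 ≤ j ∧ j < n) (pre : List (List Int)) :
    ∀ (fuel : Nat) (q : List Int) (seen : List Bool) (order : List Int),
    (∀ a ∈ q, 0 ≤ a ∧ a < n) → (seen.length : Int) = n →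
    pvBfsA d (pre.length : Int) fuel q (seen.map pvB2I) (pre ++ [order])
      = ((pvBfsB adj fuel q seen order).1.map pvB2I,
         pre ++ [(pvBfsB adj fuel q seen order).2]) := by
  intro fuel
  induction fuel with
  | zero => intro q seen order _ _; rfl
  | succ fuel ih =>
    intro q seen order hq hlen
    cases q with
    | nil => rfl
    | cons a q' =>
      have ha := hq a (by simp)
      simp only [pvBfsA, pvBfsB]
      rw [hl a ha.1 ha.2]
      rw [pvInner_rel n pre (PySem.List.pyGetD adj a []) q' seen order
        (pvAdjRow_bounds adj n hadj a) hlen]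
      exact ih _ _ _
        (pvInnerB_inv n (PySem.List.pyGetD adj a []) q' seen order
          (fun x hx => hq x (by simp [hx])) (pvAdjRow_bounds adj n hadj a)).1
        (by rw [(pvInnerB_inv n (PySem.List.pyGetD adj a []) q' seen order
          (fun x hx => hq x (by simp [hx])) (pvAdjRow_bounds adj n hadj a)).2]; exact hlen)

theorem pvInnerB_len (l : List Int) :
    ∀ (q : List Int) (seen : List Bool) (order : List Int),
    ((l.foldl (fun (st : List Int × List Bool × List Int) j =>
        if PySem.List.pyGetD st.2.1 j false then st
        else (st.1 ++ [j], PySem.List.pySetD st.2.1 j true, st.2.2 ++ [j])) (q, seen, order)).2.1.length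
      = seen.length) := by
  induction l with
  | nil => intro q seen order; rfl
  | cons j l ih =>
    intro q seen order
    rw [List.foldl_cons]
    by_cases hseen : PySem.List.pyGetD seen j false
    · simp only [if_pos hseen]
      exact ih q seen order
    · simp only [if_neg hseen]
      rw [ih]
      unfold PySem.List.pySetD
      cases h : PySem.List.pySet? seen j true with
      | none => simp
      | some s =>
        simp only [Option.getD_some]
        unfold PySem.List.pySet? at h
        rw [Option.map_eq_some_iff] at h
        obtain ⟨k, -, rfl⟩ := h
        simp

theorem pvBfsB_len (adj : List (List Int)) :
    ∀ (fuel : Nat) (q : List Int) (seen : List Bool) (order : List Int),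
    (pvBfsB adj fuel q seen order).1.length = seen.length := by
  intro fuel
  induction fuel with
  | zero => intro q seen order; rfl
  | succ fuel ih =>
    intro q seen order
    cases q with
    | nil => rfl
    | cons a q' =>
      simp only [pvBfsB]
      rw [ih]
      exact pvInnerB_len (PySem.List.pyGetD adj a []) q' seen order

theorem pvOuter_rel (d : PySem.Dict Int (List Int)) (adj : List (List Int)) (n : Int)
    (fuel : Nat)
    (hl : ∀ a : Int, 0 ≤ a → a < n → d.getD a [] = PySem.List.pyGetD adj a [])
    (hadj : ∀ row ∈ adj, ∀ j ∈ row, 0 ≤ j ∧ j < n) :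
    ∀ (L : List Int) (seen : List Bool) (comp : List (List Int)),
    (∀ i ∈ L, 0 ≤ i ∧ i < n) → (seen.length : Int) = n → comp ≠ [] →
    (L.foldl (fun (st : List Int × List (List Int) × Int) i =>
        if PySem.List.pyGetD st.1 i 0 = 0 then
          if PySem.List.len (d.getD i []) = 0 then
            (st.1, PySem.List.pySetD st.2.1 0 (PySem.List.pyGetD st.2.1 0 [] ++ [i]), st.2.2)
          else
            let idx := st.2.2 + 1
            let r := pvBfsA d idx fuel [i] (PySem.List.pySetD st.1 i 1) (st.2.1 ++ [[i]])
            (r.1, r.2, idx)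
        else st) (seen.map pvB2I, comp, (comp.length : Int) - 1))
    = ((L.foldl (fun (st : List Bool × List (List Int)) i =>
          if PySem.List.pyGetD st.1 i false then st
          else if PySem.List.len (PySem.List.pyGetD adj i []) = 0 then
            (st.1, PySem.List.pySetD st.2 0 (PySem.List.pyGetD st.2 0 [] ++ [i]))
          else
            let r := pvBfsB adj fuel [i] (PySem.List.pySetD st.1 i true) [i]
            (r.1, st.2 ++ [r.2])) (seen, comp)).1.map pvB2I,
       (L.foldl (fun (st : List Bool × List (List Int)) i =>
          if PySem.List.pyGetD st.1 i false then st
          else if PySem.List.len (PySem.List.pyGetD adj i []) = 0 then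
            (st.1, PySem.List.pySetD st.2 0 (PySem.List.pyGetD st.2 0 [] ++ [i]))
          else
            let r := pvBfsB adj fuel [i] (PySem.List.pySetD st.1 i true) [i]
            (r.1, st.2 ++ [r.2])) (seen, comp)).2,
       ((L.foldl (fun (st : List Bool × List (List Int)) i =>
          if PySem.List.pyGetD st.1 i false then st
          else if PySem.List.len (PySem.List.pyGetD adj i []) = 0 then
            (st.1, PySem.List.pySetD st.2 0 (PySem.List.pyGetD st.2 0 [] ++ [i]))
          else
            let r := pvBfsB adj fuel [i] (PySem.List.pySetD st.1 i true) [i]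
            (r.1, st.2 ++ [r.2])) (seen, comp)).2.length : Int) - 1) := by
  intro L
  induction L with
  | nil => intro seen comp _ _ _; rfl
  | cons i L ih =>
    intro seen comp hb hlen hne
    have hi := hb i (by simp)
    rw [List.foldl_cons, List.foldl_cons]
    by_cases hseen : PySem.List.pyGetD seen i false
    · have hA : ¬ (PySem.List.pyGetD (seen.map pvB2I) i 0 = 0) := by
        rw [pvGetD_map_b2i seen i hi.1 (by omega)]
        simp [hseen]
      simp only [if_neg hA, if_pos hseen]
      exact ih seen comp (fun x hx => hb x (by simp [hx])) hlen hne
    · have hA : PySem.List.pyGetD (seen.map pvB2I) i 0 = 0 := by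
        rw [pvGetD_map_b2i seen i hi.1 (by omega)]
        simpa using hseen
      simp only [if_pos hA, if_neg hseen, hl i hi.1 hi.2]
      by_cases hemp : PySem.List.len (PySem.List.pyGetD adj i []) = 0
      · simp only [if_pos hemp]
        have hclen : (PySem.List.pySetD comp 0 (PySem.List.pyGetD comp 0 [] ++ [i])).length
            = comp.length := by
          rw [PySem.List.pySetD_of_nonneg _ _ (by norm_num), List.length_set]
        have hcne : PySem.List.pySetD comp 0 (PySem.List.pyGetD comp 0 [] ++ [i]) ≠ [] := by
          apply List.ne_nil_of_length_pos
          rw [hclen]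
          exact List.length_pos_of_ne_nil hne
        have := ih seen (PySem.List.pySetD comp 0 (PySem.List.pyGetD comp 0 [] ++ [i]))
          (fun x hx => hb x (by simp [hx])) hlen hcne
        rw [hclen] at this
        exact this
      · simp only [if_neg hemp]
        have hidx : (comp.length : Int) - 1 + 1 = ((comp.length : Nat) : Int) := by omega
        simp only [hidx]
        rw [pvSetD_map_b2i seen i hi.1]
        rw [pvBfs_rel d adj n hl hadj comp fuel [i] (PySem.List.pySetD seen i true) [i]
          (fun a ha => by rw [List.mem_singleton] at ha; subst ha; exact hi)
          (by rw [PySem.List.pySetD_of_nonneg _ _ hi.1, List.length_set]; exact hlen)]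
        have hlen' : ((pvBfsB adj fuel [i] (PySem.List.pySetD seen i true) [i]).1.length : Int) = n := by
          rw [pvBfsB_len, PySem.List.pySetD_of_nonneg _ _ hi.1, List.length_set]
          exact hlen
        have harg : ((comp.length : Nat) : Int)
            = (((comp ++ [(pvBfsB adj fuel [i] (PySem.List.pySetD seen i true) [i]).2]).length : Nat) : Int) - 1 := by
          simp only [List.length_append, List.length_cons, List.length_nil]
          push_cast
          omega
        rw [harg]
        exact ih (pvBfsB adj fuel [i] (PySem.List.pySetD seen i true) [i]).1
          (comp ++ [(pvBfsB adj fuel [i] (PySem.List.pySetD seen i true) [i]).2])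
          (fun x hx => hb x (by simp [hx])) hlen' (by simp)

theorem get_component_eq (cl : List (List Int)) : get_component cl = get_component_alt cl := by
  unfold get_component pvConnectedGraph get_component_alt
  have hsz : ((PySem.Dict.size (pvConflictDict cl) : Nat) : Int) = PySem.List.len cl := by
    rw [pvConflictDict_size]; simp [PySem.List.len_eq]
  simp only [hsz]
  have h0n : (0 : Int) ≤ PySem.List.len cl := by simp [PySem.List.len_eq]
  have hseen0 : ((PySem.List.pyRepeat [false] (PySem.List.len cl)).length : Int)
      = PySem.List.len cl := by
    rw [PySem.List.pyRepeat_singleton, List.length_replicate]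
    omega
  have hvisit0 : (PySem.List.pyRange 0 (PySem.List.len cl) 1).map (fun _ => (0 : Int))
      = (PySem.List.pyRepeat [false] (PySem.List.len cl)).map pvB2I := by
    rw [PySem.List.pyRepeat_singleton, List.map_const', List.map_replicate,
        PySem.List.length_pyRange_one]
    norm_num [pvB2I]
  have hl : ∀ a : Int, 0 ≤ a → a < PySem.List.len cl →
      (pvConflictDict cl).getD a [] = PySem.List.pyGetD (pvAdjAlt cl (pvOwners cl)) a [] := by
    intro a h0 h1
    rw [pvConflictDict_getD cl a h0 h1, pvAdjAlt_getD cl a h0 h1]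
  have hb : ∀ i ∈ PySem.List.pyRange 0 (PySem.List.len cl) 1,
      0 ≤ i ∧ i < PySem.List.len cl := by
    intro i hi
    rw [PySem.List.mem_pyRange_one] at hi
    exact hi
  have H := pvOuter_rel (pvConflictDict cl) (pvAdjAlt cl (pvOwners cl)) (PySem.List.len cl)
    ((PySem.List.len cl).toNat + 1) hl (pvAdjAlt_bounds cl)
    (PySem.List.pyRange 0 (PySem.List.len cl) 1)
    (PySem.List.pyRepeat [false] (PySem.List.len cl)) [[]] hb hseen0 (by simp)
  have H1 := H
  norm_num at H1
  rw [hvisit0]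
  have := congrArg (fun (st : List Int × List (List Int) × Int) => st.2.1) H1
  simpa using this

-- ===== VERDICT (by name: the statement is the Claim_ definition above) =====
theorem get_component_spec : Claim_equal_get_component := by
  intro cluster_in _
  unfold Spec_get_component
  exact get_component_eq cluster_in
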